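-- pv_equiv track=rewrite | github.com/Mi01sha01/2026_CPD_practice | Normal Problem.py | solve
-- ===== SOURCE A (Python) =====
-- def solve(a):
--     b = ""
--     for i in range(len(a) - 1, -1, -1):
--         if a[i] == "q":
--             b += "p"
--         elif a[i] == "p":
--             b += "q"
--         else:
--             b += a[i]
--     return b
-- ===== SOURCE B (Python) =====
-- def solve(a):
--     return a.translate(str.maketrans("pq", "qp"))[::-1]
-- ===== Notes on version B (the rewrite author's own statement) =====
-- stated objective: idiomatic
-- what changed: Replaces the reverse-index loop with per-character branching and running string concatenation by two decomposed passes: a translation table (str.maketrans/translate) mapping p<->q over the whole string, then a slice reversal.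
import Mathlib
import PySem

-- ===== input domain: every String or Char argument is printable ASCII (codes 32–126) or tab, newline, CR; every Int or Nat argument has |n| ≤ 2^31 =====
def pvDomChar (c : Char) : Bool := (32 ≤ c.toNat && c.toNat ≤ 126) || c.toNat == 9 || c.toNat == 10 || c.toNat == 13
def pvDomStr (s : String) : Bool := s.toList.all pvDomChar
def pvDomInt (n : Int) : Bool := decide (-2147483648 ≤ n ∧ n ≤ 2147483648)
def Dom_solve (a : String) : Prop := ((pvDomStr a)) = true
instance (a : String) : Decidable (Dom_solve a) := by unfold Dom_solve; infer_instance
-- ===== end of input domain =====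

-- B replaces A's reverse-index loop (branching + running concatenation) by a
-- translation-table map over the whole string followed by a slice reversal (idiomatic).

-- ===== PORT A =====
-- b = ""; for i in range(len(a)-1, -1, -1): branch on a[i], b += …; return b
def solve (a : String) : String :=
  let l := a.toList
  let b := (PySem.List.pyRange ((l.length : Int) - 1) (-1) (-1)).foldl
    (fun b i =>
      let c := PySem.List.pyGetD l i ' '   -- a[i]; index always in range here
      if c = 'q' then b ++ ['p']
      else if c = 'p' then b ++ ['q']
      else b ++ [c]) []
  String.ofList b

-- ===== PORT B =====
-- str.maketrans("pq","qp") as an association list; translate = per-char first-match lookup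
def pvTable : List (Char × Char) := [('p', 'q'), ('q', 'p')]

def pvTranslate (c : Char) : Char := (pvTable.lookup c).getD c

def solve_alt (a : String) : String :=
  String.ofList ((a.toList.map pvTranslate).reverse)   -- translate, then [::-1]

-- ===== PRECONDITION & SPEC =====
def Spec_solve (a : String) (out : String) : Prop := out = solve_alt a
instance (a : String) (out : String) : Decidable (Spec_solve a out) := by unfold Spec_solve; infer_instance

-- ===== CLAIM (what is proved, stated in full; the proofs are below) =====
def Claim_equal_solve : Prop := ∀ (a : String), Dom_solve a → Spec_solve a (solve a)

-- ===== LEMMAS AND PROOFS =====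

theorem pvTranslate_eq (c : Char) :
    (if c = 'q' then 'p' else if c = 'p' then 'q' else c) = pvTranslate c := by
  by_cases hq : c = 'q'
  · subst hq; decide
  · by_cases hp : c = 'p'
    · subst hp; decide
    · have h1 : (c == 'p') = false := by simp [hp]
      have h2 : (c == 'q') = false := by simp [hq]
      simp [pvTranslate, pvTable, List.lookup, h1, h2, hq, hp]

theorem solve_loop (l : List Char) (k : Nat) (hk : k ≤ l.length) (b : List Char) :
    (PySem.List.pyRange ((k : Int) - 1) (-1) (-1)).foldl
      (fun b i =>
        let c := PySem.List.pyGetD l i ' '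
        if c = 'q' then b ++ ['p']
        else if c = 'p' then b ++ ['q']
        else b ++ [c]) b
    = b ++ ((l.take k).map pvTranslate).reverse := by
  induction k generalizing b with
  | zero =>
      rw [PySem.List.pyRange_neg_one_eq_nil (by omega)]
      simp
  | succ k ih =>
      have hk' : k < l.length := by omega
      have hcast : ((k + 1 : Nat) : Int) - 1 = (k : Int) := by push_cast; ring
      rw [hcast, PySem.List.pyRange_neg_one_cons (by omega)]
      simp only [List.foldl_cons]
      have hget : PySem.List.pyGetD l (k : Int) ' ' = l[k] := by
        rw [PySem.List.pyGetD_natCast, List.getD_eq_getElem _ _ hk']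
      simp only [hget]
      rw [ih (by omega)]
      have hstep : (List.map pvTranslate (List.take (k + 1) l)).reverse
          = pvTranslate l[k] :: (List.map pvTranslate (List.take k l)).reverse := by
        rw [List.take_add_one, List.getElem?_eq_getElem hk']
        simp only [Option.toList_some, List.map_append, List.map_cons, List.map_nil,
          List.reverse_append, List.reverse_cons, List.reverse_nil, List.nil_append,
          List.cons_append]
      rw [hstep, ← pvTranslate_eq l[k]]
      split_ifs with hq hp <;> simp

theorem solve_spec : Claim_equal_solve := by
  intro a _
  unfold Spec_solve solve solve_alt
  simp only []
  rw [solve_loop a.toList a.toList.length le_rfl [], List.take_of_length_le le_rfl]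
  simp
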